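-- pv_equiv track=rewrite | github.com/fmelodb/demo-oracle-vector-dbpedia | dbpedia.py | distribute_queries
-- ===== SOURCE A (Python) =====
-- from typing import List, Tuple, Dict
--
-- def distribute_queries(num_queries: int, num_threads: int) -> List[List[int]]:
--     """
--     Distribui as queries entre as threads de forma balanceada.
--
--     Args:
--         num_queries: número total de queries
--         num_threads: número de threads
--
--     Returns:
--         List[List[int]]: lista de listas, onde cada sublista contém os índices
--                          das queries para uma thread específica
--     """
--     queries_per_thread = num_queries // num_threads
--     remainder = num_queries % num_threads
--
--     distributions = []
--     current_idx = 0
--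
--     for i in range(num_threads):
--         # Threads iniciais recebem uma query extra se houver resto
--         size = queries_per_thread + (1 if i < remainder else 0)
--         distributions.append(list(range(current_idx, current_idx + size)))
--         current_idx += size
--
--     return distributions
-- ===== SOURCE B (Python) =====
-- def distribute_queries(num_queries: int, num_threads: int):
--     q, r = divmod(num_queries, num_threads)
--     def start(i):
--         return i * q + min(i, r)
--     return [list(range(start(i), start(i + 1))) for i in range(num_threads)]
-- ===== Notes on version B (the rewrite author's own statement) =====
-- stated objective: simpler
-- what changed: Replaces the sequential current_idx accumulator with a closed-form per-thread boundary start(i) = i*q + min(i, r), so each bucket is computed independently by a comprehension instead of carrying state across iterations.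
import Mathlib
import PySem

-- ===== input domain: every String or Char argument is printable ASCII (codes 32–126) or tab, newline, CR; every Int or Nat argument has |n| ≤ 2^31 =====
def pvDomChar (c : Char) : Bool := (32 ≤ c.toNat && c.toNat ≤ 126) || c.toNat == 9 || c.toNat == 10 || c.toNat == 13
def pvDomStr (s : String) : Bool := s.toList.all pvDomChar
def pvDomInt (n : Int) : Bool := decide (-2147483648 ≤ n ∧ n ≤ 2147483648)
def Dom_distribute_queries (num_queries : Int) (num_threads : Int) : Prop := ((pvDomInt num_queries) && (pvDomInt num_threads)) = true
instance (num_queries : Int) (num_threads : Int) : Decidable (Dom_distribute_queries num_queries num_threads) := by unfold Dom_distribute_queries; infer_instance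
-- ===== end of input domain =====

-- B replaces A's running current_idx accumulator with closed-form per-thread boundaries
-- start(i) = i*q + min(i, r); the objective is a simpler, state-free decomposition (no speed claim).

-- ===== PORT A =====
-- Literal port of A: floor division and modulo, then a loop carrying (distributions, current_idx).
def distribute_queries (num_queries : Int) (num_threads : Int) : List (List Int) :=
  let queries_per_thread := PySem.Int.floordiv num_queries num_threads
  let remainder := PySem.Int.mod num_queries num_threads
  let st := (PySem.List.pyRange 0 num_threads 1).foldl
    (fun (st : List (List Int) × Int) i =>
      let size := queries_per_thread + (if i < remainder then 1 else 0)
      (st.1 ++ [PySem.List.pyRange st.2 (st.2 + size) 1], st.2 + size))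
    ([], 0)
  st.1

-- ===== PORT B =====
-- closed-form boundary: start(i) = i*q + min(i, r)
def dqStart (q r i : Int) : Int := i * q + min i r

def distribute_queries_alt (num_queries : Int) (num_threads : Int) : List (List Int) :=
  let q := PySem.Int.floordiv num_queries num_threads
  let r := PySem.Int.mod num_queries num_threads
  (PySem.List.pyRange 0 num_threads 1).map
    (fun i => PySem.List.pyRange (dqStart q r i) (dqStart q r (i + 1)) 1)

-- ===== PRECONDITION & SPEC =====
-- Python A raises ZeroDivisionError when num_threads = 0 (so does B); exactly that input is excluded.
def Pre_distribute_queries (num_queries : Int) (num_threads : Int) : Prop := num_threads ≠ 0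
instance (num_queries : Int) (num_threads : Int) : Decidable (Pre_distribute_queries num_queries num_threads) := by unfold Pre_distribute_queries; infer_instance
def pvWitness_distribute_queries : Int × Int := (7, 3)

def Spec_distribute_queries (num_queries : Int) (num_threads : Int) (out : List (List Int)) : Prop := out = distribute_queries_alt num_queries num_threads
instance (num_queries : Int) (num_threads : Int) (out : List (List Int)) : Decidable (Spec_distribute_queries num_queries num_threads out) := by unfold Spec_distribute_queries; infer_instance

-- ===== CLAIM (what is proved, stated in full; the proofs are below) =====
def Claim_equal_distribute_queries : Prop := ∀ (num_queries : Int) (num_threads : Int), Dom_distribute_queries num_queries num_threads → Pre_distribute_queries num_queries num_threads → Spec_distribute_queries num_queries num_threads (distribute_queries num_queries num_threads)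

-- ===== LEMMAS AND PROOFS =====

-- The successor boundary: start(i) + size(i) = start(i+1), for every i, r.
lemma dqStart_succ (q r i : Int) :
    dqStart q r i + (q + (if i < r then 1 else 0)) = dqStart q r (i + 1) := by
  unfold dqStart
  rw [add_one_mul]
  simp only [min_def]
  split_ifs <;> omega

-- Loop invariant: folding A's step over range [a, nt) from accumulator (L, start a)
-- appends exactly B's independently-computed buckets.
lemma dq_loop (q r nt : Int) : ∀ (n : Nat) (a : Int), (nt - a).toNat = n →
    ∀ (L : List (List Int)),
    ((PySem.List.pyRange a nt 1).foldl
      (fun (st : List (List Int) × Int) i =>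
        let size := q + (if i < r then 1 else 0)
        (st.1 ++ [PySem.List.pyRange st.2 (st.2 + size) 1], st.2 + size))
      (L, dqStart q r a)).1
    = L ++ (PySem.List.pyRange a nt 1).map
        (fun i => PySem.List.pyRange (dqStart q r i) (dqStart q r (i + 1)) 1) := by
  intro n
  induction n with
  | zero =>
    intro a ha L
    rw [PySem.List.pyRange_one_eq_nil (by omega)]
    simp
  | succ m ih =>
    intro a ha L
    rw [PySem.List.pyRange_one_cons (by omega)]
    simp only [List.foldl_cons, List.map_cons]
    rw [dqStart_succ q r a]
    rw [ih (a + 1) (by omega)]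
    simp

lemma dqStart_zero (q r : Int) (hr : 0 ≤ r) : dqStart q r 0 = 0 := by
  unfold dqStart
  simp only [min_def]
  split_ifs <;> omega

-- ===== VERDICT (by name: the statement is the Claim_ definition above) =====
theorem distribute_queries_spec : Claim_equal_distribute_queries := by
  intro nq nt _ _
  unfold Spec_distribute_queries distribute_queries distribute_queries_alt
  rcases Int.lt_or_le 0 nt with hpos | hle
  · have hr : 0 ≤ PySem.Int.mod nq nt := by
      rw [PySem.Int.mod_eq_emod_of_pos hpos]
      exact Int.emod_nonneg nq (by omega)
    have h := dq_loop (PySem.Int.floordiv nq nt) (PySem.Int.mod nq nt) nt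
        ((nt - 0).toNat) 0 rfl []
    rw [dqStart_zero _ _ hr] at h
    simpa using h
  · rw [PySem.List.pyRange_one_eq_nil hle]
    simp
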